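-- pv_equiv track=rewrite | github.com/hugo-sants/graph-theory | ep02-7-main/ep02-7/src/Q03.py | get_common_business
-- ===== SOURCE A (Python) =====
-- def get_common_business(group, mapping):
--     common = None
--
--     for user in group:
--         if common is None:
--             common = mapping[user].copy()
--         else:
--             common = common.intersection(mapping[user])
--
--     return common
-- ===== SOURCE B (Python) =====
-- def get_common_business(group, mapping):
--     users = list(dict.fromkeys(group))
--     if not users:
--         return None
--     counts = {}
--     for u in users:
--         for x in mapping[u]:
--             counts[x] = counts.get(x, 0) + 1
--     n = len(users)
--     return {x for x, c in counts.items() if c == n}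
-- ===== Notes on version B (the rewrite author's own statement) =====
-- stated objective: alternative
-- what changed: Replaces A's iterative pairwise set intersection with a single counting pass (one frequency dict over all users' sets) followed by a threshold filter keeping elements whose count equals the number of distinct users.
import Mathlib
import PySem

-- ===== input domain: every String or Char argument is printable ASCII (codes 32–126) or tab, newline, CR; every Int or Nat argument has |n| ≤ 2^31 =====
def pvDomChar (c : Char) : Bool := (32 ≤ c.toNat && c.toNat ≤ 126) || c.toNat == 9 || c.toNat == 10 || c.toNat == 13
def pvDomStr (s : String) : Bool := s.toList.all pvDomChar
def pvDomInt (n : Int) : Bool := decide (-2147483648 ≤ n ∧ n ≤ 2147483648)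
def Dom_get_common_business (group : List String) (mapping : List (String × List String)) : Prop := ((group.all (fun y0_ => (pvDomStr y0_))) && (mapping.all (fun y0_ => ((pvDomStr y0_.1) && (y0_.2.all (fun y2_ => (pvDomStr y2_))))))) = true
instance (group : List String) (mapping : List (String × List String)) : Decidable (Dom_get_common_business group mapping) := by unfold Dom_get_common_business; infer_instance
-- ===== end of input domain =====

-- B replaces A's iterative pairwise set intersection by one counting pass (a frequency dict over all
-- users' sets) plus a threshold filter; equal output on every group whose users are all mapping keys.


-- ===== PORT A =====
-- mapping[user]; the [] default is never reached under Pre_ (user is a key of mapping)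
def pvLookup (mapping : List (String × List String)) (user : String) : List String :=
  ((PySem.Dict.mk mapping).get? user).getD []

def get_common_business (group : List String) (mapping : List (String × List String)) : Option (List String) :=
  group.foldl (fun common user =>
    match common with
    | none => some (pvLookup mapping user)                          -- common = mapping[user].copy()
    | some c => some (PySem.Set.inter c (pvLookup mapping user)))   -- common = common.intersection(mapping[user])
    none

-- ===== PORT B =====
def get_common_business_alt (group : List String) (mapping : List (String × List String)) : Option (List String) :=
  let users := PySem.List.dedup group                               -- users = list(dict.fromkeys(group))
  if users.isEmpty then none
  else
    let counts := users.foldl (fun d u =>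
      (pvLookup mapping u).foldl (fun d x => d.modify x 0 (· + 1)) d)   -- counts[x] = counts.get(x, 0) + 1
      PySem.Dict.empty
    let n : Int := users.length
    some (PySem.Set.ofList ((counts.items.filter (fun p => p.2 == n)).map Prod.fst))

-- ===== PRECONDITION & SPEC =====
-- Pre_ excludes (a) groups containing a user that is not a key of mapping, where A raises KeyError,
-- and (b) association lists that are not valid encodings of dict[str, set[str]] (a value list with
-- duplicate elements), which no Python input produces.
def Pre_get_common_business (group : List String) (mapping : List (String × List String)) : Prop :=
  (∀ u ∈ group, u ∈ mapping.map Prod.fst) ∧ (∀ p ∈ mapping, p.2.Nodup)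
instance (group : List String) (mapping : List (String × List String)) : Decidable (Pre_get_common_business group mapping) := by unfold Pre_get_common_business; infer_instance

def pvWitness_get_common_business : List String × (List (String × List String)) :=
  (["a", "b"], [("a", ["x", "y"]), ("b", ["y", "z"])])

def Spec_get_common_business (group : List String) (mapping : List (String × List String)) (out : Option (List String)) : Prop := out = get_common_business_alt group mapping
instance (group : List String) (mapping : List (String × List String)) (out : Option (List String)) : Decidable (Spec_get_common_business group mapping out) := by unfold Spec_get_common_business; infer_instance

-- ===== CLAIM (what is proved, stated in full; the proofs are below) =====
def Claim_equal_get_common_business : Prop := ∀ (group : List String) (mapping : List (String × List String)), Dom_get_common_business group mapping → Pre_get_common_business group mapping → Spec_get_common_business group mapping (get_common_business group mapping)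

-- ===== LEMMAS AND PROOFS =====

-- every value a lookup can return is duplicate-free (from Pre_'s set-encoding invariant)
theorem pvLookup_nodup (mapping : List (String × List String)) (u : String)
    (h : ∀ p ∈ mapping, p.2.Nodup) : (pvLookup mapping u).Nodup := by
  induction mapping with
  | nil => simp [pvLookup, PySem.Dict.get?]
  | cons p rest ih =>
    rw [pvLookup, PySem.Dict.get?_mk_cons]
    by_cases hpu : p.1 == u
    · simp only [hpu, if_pos]
      exact h p (by simp)
    · simp only [hpu, Bool.false_eq_true, if_false]
      exact ih (fun q hq => h q (by simp [hq]))

-- A's loop, once started, is an iterated filter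
theorem foldA (mapping : List (String × List String)) (gs : List String) (c : List String) :
    gs.foldl (fun common user =>
      match common with
      | none => some (pvLookup mapping user)
      | some c => some (PySem.Set.inter c (pvLookup mapping user))) (some c)
    = some (c.filter (fun x => gs.all (fun u => PySem.Set.contains (pvLookup mapping u) x))) := by
  induction gs generalizing c with
  | nil => simp
  | cons g gs ih =>
    rw [List.foldl_cons, ih]
    congr 1
    simp only [PySem.Set.inter, List.filter_filter, List.all_cons]
    exact List.filter_congr (fun x _ => by rw [Bool.and_comm])

-- counting over flatMap = countP over the users, when every per-user list is duplicate-free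
theorem count_flatMap (L : String → List String) (users : List String) (x : String)
    (hnd : ∀ u, (L u).Nodup) :
    (users.flatMap L).count x = users.countP (fun u => decide (x ∈ L u)) := by
  induction users with
  | nil => simp
  | cons u us ih =>
    rw [List.flatMap_cons, List.count_append, ih, List.countP_cons]
    by_cases hx : x ∈ L u
    · rw [List.count_eq_one_of_mem (hnd u) hx]; simp [hx, Nat.add_comm]
    · rw [List.count_eq_zero_of_not_mem hx]; simp [hx]

-- an inner counting loop over each user's list is the counting loop over the concatenation
theorem foldl_flatMap_counts (L : String → List String) (us : List String)
    (d : PySem.Dict String Int) :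
    us.foldl (fun d u => (L u).foldl (fun d x => d.modify x 0 (· + 1)) d) d
    = (us.flatMap L).foldl (fun d x => d.modify x 0 (· + 1)) d := by
  induction us generalizing d with
  | nil => rfl
  | cons u us ih => rw [List.flatMap_cons, List.foldl_append, List.foldl_cons, ih]

-- the nested counting loop is a Counter of the concatenation of the users' lists
theorem countsB (L : String → List String) (users : List String) :
    users.foldl (fun d u => (L u).foldl (fun d x => d.modify x 0 (· + 1)) d) PySem.Dict.empty
    = PySem.Dict.counter (users.flatMap L) := by
  rw [PySem.Dict.counter_eq_foldl, foldl_flatMap_counts]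

-- ===== VERDICT (by name: the statement is the Claim_ definition above) =====
theorem get_common_business_spec : Claim_equal_get_common_business := by
  intro group mapping _hdom hpre
  obtain ⟨hkeys, hnodup⟩ := hpre
  unfold Spec_get_common_business
  cases group with
  | nil => rfl
  | cons g0 gs =>
    set L := pvLookup mapping with hL
    have hLnd : ∀ u, (L u).Nodup := fun u => pvLookup_nodup mapping u hnodup
    -- A's side
    rw [get_common_business, List.foldl_cons, foldA]
    -- B's side
    rw [get_common_business_alt]
    set us1 := (PySem.Set.ofList gs).filter (fun y => !(PySem.Set.contains [g0] y)) with hus1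
    have husers : PySem.List.dedup (g0 :: gs) = g0 :: us1 := by
      have h1 : PySem.List.dedup (g0 :: gs) = PySem.Set.update [g0] gs := rfl
      rw [h1, PySem.Set.update_eq_append_filter]
      rfl
    set users := PySem.List.dedup (g0 :: gs) with husersdef
    have husers_ne : users.isEmpty = false := by rw [husers]; rfl
    have hg0 : g0 ∈ users := by rw [husers]; simp
    have hmem : ∀ u, u ∈ users ↔ (u = g0 ∨ u ∈ gs) := by
      intro u
      rw [husersdef, PySem.List.mem_dedup, List.mem_cons]
    simp only [husers_ne, Bool.false_eq_true, if_false]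
    rw [countsB L users]
    congr 1
    -- the filtered items of the counter
    rw [PySem.Dict.items_counter]
    set cc := users.flatMap L with hcc
    have hcount : ∀ x, cc.count x = users.countP (fun u => decide (x ∈ L u)) :=
      fun x => count_flatMap L users x hLnd
    have hP : ∀ x, (((cc.count x : Int)) == (users.length : Int))
        = decide (∀ u ∈ users, x ∈ L u) := by
      intro x
      rw [hcount x]
      by_cases hall : ∀ u ∈ users, x ∈ L u
      · have hlen : users.countP (fun u => decide (x ∈ L u)) = users.length := by
          rw [List.countP_eq_length]; intro u hu; exact decide_eq_true (hall u hu)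
        simp only [hlen, beq_self_eq_true]
        exact (decide_eq_true hall).symm
      · have hne' : users.countP (fun u => decide (x ∈ L u)) ≠ users.length := fun h =>
          hall (fun u hu => by simpa using List.countP_eq_length.mp h u hu)
        have hne : ((users.countP (fun u => decide (x ∈ L u)) : Int)) ≠ (users.length : Int) := by
          exact_mod_cast hne'
        simp [hne, hall]
    -- map-filter-map collapses to a filter of the deduped concatenation
    have hmfm : (((PySem.Set.ofList cc).map (fun k => (k, (cc.count k : Int)))).filter
        (fun p => p.2 == (users.length : Int))).map Prod.fst
        = (PySem.Set.ofList cc).filter (fun k => decide (∀ u ∈ users, k ∈ L u)) := by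
      rw [List.filter_map, List.map_map]
      have h1 : Prod.fst ∘ (fun k : String => (k, (cc.count k : Int))) = id :=
        funext fun k => rfl
      rw [h1, List.map_id]
      exact List.filter_congr (fun k _ => hP k)
    rw [hmfm]
    -- split the concatenation at the first user
    have hcc0 : PySem.Set.ofList cc = L g0 ++ (PySem.Set.ofList (us1.flatMap L)).filter
        (fun y => !(PySem.Set.contains (L g0) y)) := by
      rw [hcc, husers, List.flatMap_cons]
      have h1 : PySem.Set.ofList (L g0 ++ us1.flatMap L)
          = PySem.Set.update (PySem.Set.ofList (L g0)) (us1.flatMap L) := by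
        rw [PySem.Set.ofList_eq_foldl, List.foldl_append, ← PySem.Set.ofList_eq_foldl]
        rfl
      rw [h1, PySem.Set.ofList_eq_self_of_nodup _ (hLnd g0), PySem.Set.update_eq_append_filter]
    rw [hcc0, List.filter_append]
    have hkill : ((PySem.Set.ofList (us1.flatMap L)).filter
        (fun y => !(PySem.Set.contains (L g0) y))).filter
        (fun k => decide (∀ u ∈ users, k ∈ L u)) = [] := by
      rw [List.filter_filter, List.filter_eq_nil_iff]
      intro k _hk
      simp only [Bool.and_eq_true, decide_eq_true_eq, Bool.not_eq_true',
        PySem.Set.contains_eq_listContains]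
      rintro ⟨hall, hnotg0⟩
      exact absurd (hall g0 hg0) (by simpa using hnotg0)
    rw [hkill, List.append_nil]
    -- the surviving filter is nodup, so the outer set() is the identity
    rw [PySem.Set.ofList_eq_self_of_nodup _ (List.Nodup.filter _ (hLnd g0))]
    -- finally the two filter conditions agree on members of L g0
    refine (List.filter_congr (fun x hx => ?_)).symm
    simp only [PySem.Set.contains_eq_listContains]
    by_cases hall : ∀ u ∈ users, x ∈ L u
    · have hgs : ∀ u ∈ gs, x ∈ L u := fun u hu => hall u ((hmem u).mpr (Or.inr hu))
      rw [decide_eq_true hall]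
      symm
      rw [List.all_eq_true]
      intro u hu
      simpa using hgs u hu
    · have hgs : ¬ ∀ u ∈ gs, x ∈ L u := by
        intro hgs
        exact hall (fun u hu => by
          rcases (hmem u).mp hu with h | h
          · exact h ▸ hx
          · exact hgs u h)
      rw [decide_eq_false hall]
      symm
      rw [Bool.eq_false_iff]
      intro hcon
      rw [List.all_eq_true] at hcon
      exact hgs (fun u hu => by simpa using hcon u hu)
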